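-- pv_equiv track=rewrite | github.com/JetBrains-Research/pubtrends | nature_reviews/src/utils/preprocessing.py | unique_ids_clustering
-- ===== SOURCE A (Python) =====
-- def unique_ids_clustering(clustering, method):
--     """
--     Ensures that each paper is assigned only to one cluster by one of the methods:
--      * 'first_occurence' - paper is assigned to the first cluster
--      * 'unique_only' - only papers belonging to one cluster are taken into account
--     """
--     id_cluster = {}
--     for i, cluster in enumerate(clustering):
--         for pmid in cluster:
--             if pmid not in id_cluster:
--                 id_cluster[pmid] = []
--             id_cluster[pmid].append(i)
--     if method == 'first_occurrence':
--         return {str(k): v[0] for k, v in id_cluster.items()}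
--     elif method == 'unique_only':
--         return {str(k): v[0] for k, v in id_cluster.items() if len(set(v)) == 1}
-- ===== SOURCE B (Python) =====
-- def unique_ids_clustering(clustering, method):
--     """
--     Staged passes instead of occurrence-list grouping: one setdefault pass gives
--     each pmid its first cluster index; for 'unique_only' a second counting pass
--     over the deduplicated clusters counts how many clusters contain each pmid.
--     """
--     if method not in ('first_occurrence', 'unique_only'):
--         return None
--     first = {}
--     for i, cluster in enumerate(clustering):
--         for pmid in cluster:
--             first.setdefault(pmid, i)
--     if method == 'first_occurrence':
--         return {str(k): v for k, v in first.items()}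
--     count = {}
--     for cluster in clustering:
--         for pmid in set(cluster):
--             count[pmid] = count.get(pmid, 0) + 1
--     return {str(k): v for k, v in first.items() if count.get(k, 0) == 1}
-- ===== Notes on version B (the rewrite author's own statement) =====
-- stated objective: alternative
-- what changed: Replaces A's grouping of every occurrence's cluster index into per-pmid lists (then v[0]/len(set(v)) post-processing) by staged passes: an early method check, a setdefault pass recording only each pmid's first cluster index, and, for 'unique_only' only, a separate counting pass over the deduplicated clusters that counts how many clusters contain each pmid.
-- outside the precondition, e.g. on unique_ids_clustering([[1]], 'x'): A returns None, B returns None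
import Mathlib
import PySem

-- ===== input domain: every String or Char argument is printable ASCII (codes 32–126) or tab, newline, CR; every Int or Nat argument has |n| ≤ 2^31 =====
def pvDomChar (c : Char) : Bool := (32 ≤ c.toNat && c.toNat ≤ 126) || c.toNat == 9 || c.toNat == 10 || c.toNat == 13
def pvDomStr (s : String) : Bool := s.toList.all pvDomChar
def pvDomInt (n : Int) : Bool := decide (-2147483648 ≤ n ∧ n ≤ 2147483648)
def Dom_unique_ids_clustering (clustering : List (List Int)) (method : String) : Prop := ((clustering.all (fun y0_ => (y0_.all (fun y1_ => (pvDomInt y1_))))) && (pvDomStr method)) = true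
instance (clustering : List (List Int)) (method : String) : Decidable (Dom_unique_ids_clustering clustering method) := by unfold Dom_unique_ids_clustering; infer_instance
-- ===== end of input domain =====

-- B replaces A's per-pmid occurrence-index lists and the v[0]/len(set(v)) post-processing by
-- staged passes: an early method check, a setdefault pass keeping only first cluster indices,
-- and (for 'unique_only') a counting pass over deduplicated clusters (alternative decomposition).


-- ===== PORT A =====
-- body of A's inner loop: ensure the key exists, then append the cluster index i
def uicStepA (i : Int) (d : PySem.Dict Int (List Int)) (pmid : Int) : PySem.Dict Int (List Int) :=
  let d' := if d.contains pmid then d else d.insert pmid []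
  d'.modify pmid [] (fun v => v ++ [i])

def unique_ids_clustering (clustering : List (List Int)) (method : String) : List (String × Int) :=
  let id_cluster : PySem.Dict Int (List Int) :=
    (PySem.List.enumerate clustering 0).foldl
      (fun d p => p.2.foldl (uicStepA p.1) d) PySem.Dict.empty
  if method = "first_occurrence" then
    -- v[0]: every stored list is nonempty (an index is appended on creation), headD never defaults
    id_cluster.items.map (fun kv => (PySem.Int.toStr kv.1, kv.2.headD 0))
  else if method = "unique_only" then
    (id_cluster.items.filter (fun kv => PySem.Set.len (PySem.Set.ofList kv.2) == 1)).map
      (fun kv => (PySem.Int.toStr kv.1, kv.2.headD 0))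
  else []  -- Python returns None here; excluded by Pre_

-- ===== PORT B =====
def unique_ids_clustering_alt (clustering : List (List Int)) (method : String) : List (String × Int) :=
  if ¬(method = "first_occurrence" ∨ method = "unique_only") then []  -- Python returns None; excluded by Pre_
  else
    let first : PySem.Dict Int Int :=
      (PySem.List.enumerate clustering 0).foldl
        (fun d p => p.2.foldl (fun d pmid => d.setdefault pmid p.1) d) PySem.Dict.empty
    if method = "first_occurrence" then
      first.items.map (fun kv => (PySem.Int.toStr kv.1, kv.2))
    else
      let count : PySem.Dict Int Int :=
        clustering.foldl
          (fun d c => (PySem.Set.ofList c).foldl (fun d pmid => d.insert pmid (d.getD pmid 0 + 1)) d)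
          PySem.Dict.empty
      (first.items.filter (fun kv => count.getD kv.1 0 == 1)).map
        (fun kv => (PySem.Int.toStr kv.1, kv.2))

-- ===== PRECONDITION & SPEC =====
-- Pre_ excludes unrecognized method strings, on which the Python A falls through and
-- returns None, which is not a dict value of the declared return type.
def Pre_unique_ids_clustering (clustering : List (List Int)) (method : String) : Prop :=
  method = "first_occurrence" ∨ method = "unique_only"
instance (clustering : List (List Int)) (method : String) : Decidable (Pre_unique_ids_clustering clustering method) := by unfold Pre_unique_ids_clustering; infer_instance

def pvWitness_unique_ids_clustering : List (List Int) × String := ([[1, 2], [2]], "unique_only")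

def Spec_unique_ids_clustering (clustering : List (List Int)) (method : String) (out : List (String × Int)) : Prop := out = unique_ids_clustering_alt clustering method
instance (clustering : List (List Int)) (method : String) (out : List (String × Int)) : Decidable (Spec_unique_ids_clustering clustering method out) := by unfold Spec_unique_ids_clustering; infer_instance

-- ===== CLAIM (what is proved, stated in full; the proofs are below) =====
def Claim_equal_unique_ids_clustering : Prop := ∀ (clustering : List (List Int)) (method : String), Dom_unique_ids_clustering clustering method → Pre_unique_ids_clustering clustering method → Spec_unique_ids_clustering clustering method (unique_ids_clustering clustering method)

-- ===== LEMMAS AND PROOFS =====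

def uicPairs (s : Int) (L : List (List Int)) : List (Int × Int) :=
  (PySem.List.enumerate L s).flatMap (fun q => q.2.map (fun x => (x, q.1)))

theorem uicPairs_nil (s : Int) : uicPairs s [] = [] := rfl

theorem uicPairs_cons (s : Int) (c : List Int) (L : List (List Int)) :
    uicPairs s (c :: L) = c.map (fun x => (x, s)) ++ uicPairs (s + 1) L := by
  simp [uicPairs, PySem.List.enumerate_cons]

theorem uicPairs_snd_ge (s : Int) (L : List (List Int)) :
    ∀ p ∈ uicPairs s L, s ≤ p.2 := by
  induction L generalizing s with
  | nil => intro p hp; simp [uicPairs_nil] at hp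
  | cons c L ih =>
    intro p hp
    rw [uicPairs_cons] at hp
    rcases List.mem_append.mp hp with h | h
    · obtain ⟨x, _, rfl⟩ := List.mem_map.mp h; simp
    · have := ih (s + 1) p h; omega

theorem uicStepA_modify (i : Int) (d : PySem.Dict Int (List Int)) (pmid : Int) :
    uicStepA i d pmid = d.modify pmid [] (fun v => v ++ [i]) := by
  unfold uicStepA
  by_cases h : d.contains pmid = true
  · simp [h]
  · have hf : d.contains pmid = false := by simpa using h
    simp [h, PySem.Dict.modify, PySem.Dict.getD_insert_self, PySem.Dict.insert_insert_self,
      PySem.Dict.getD_of_not_contains d _ hf]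

theorem nested_flat {α : Type} (f : α → Int × Int → α) (L : List (Int × List Int)) (a : α) :
    L.foldl (fun a q => q.2.foldl (fun a x => f a (x, q.1)) a) a
      = (L.flatMap (fun q => q.2.map (fun x => (x, q.1)))).foldl f a := by
  induction L generalizing a with
  | nil => rfl
  | cons q L ih => simp [List.foldl_append, List.foldl_map, ih]

theorem A_flat (L : List (List Int)) (d : PySem.Dict Int (List Int)) :
    (PySem.List.enumerate L 0).foldl (fun d p => p.2.foldl (uicStepA p.1) d) d
      = (uicPairs 0 L).foldl (fun d p => d.modify p.1 [] (fun v => v ++ [p.2])) d := by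
  rw [uicPairs, ← nested_flat]
  congr 1
  funext d p
  congr 1
  funext d x
  exact uicStepA_modify p.1 d x

theorem B_flat (L : List (List Int)) (d : PySem.Dict Int Int) :
    (PySem.List.enumerate L 0).foldl (fun d p => p.2.foldl (fun d pmid => d.setdefault pmid p.1) d) d
      = (uicPairs 0 L).foldl (fun d p => d.setdefault p.1 p.2) d := by
  rw [uicPairs, ← nested_flat]

theorem sd_fold_getD (l : List (Int × Int)) (d : PySem.Dict Int Int) (k dflt : Int) :
    (l.foldl (fun d p => d.setdefault p.1 p.2) d).getD k dflt
      = if d.contains k then d.getD k dflt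
        else ((l.filter (fun p => p.1 == k)).map (·.2)).headD dflt := by
  induction l generalizing d with
  | nil =>
    simp only [List.foldl_nil, List.filter_nil, List.map_nil, List.headD_nil]
    by_cases h : d.contains k = true
    · simp [h]
    · simp [h, PySem.Dict.getD_of_not_contains d dflt (by simpa using h)]
  | cons p t ih =>
    simp only [List.foldl_cons]
    rw [ih]
    by_cases hc : d.contains k = true
    · have h1 : (d.setdefault p.1 p.2).contains k = true := by
        rw [PySem.Dict.contains_setdefault]
        simp [hc]
      rw [if_pos h1, if_pos hc]
      by_cases he : k = p.1
      · have hs : (d.get? k).isSome := by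
          rw [← PySem.Dict.contains_eq_isSome_get?]; exact hc
        obtain ⟨w, hw⟩ := Option.isSome_iff_exists.mp hs
        rw [he, PySem.Dict.getD_eq_get?_getD, PySem.Dict.get?_setdefault_self, ← he, hw,
          PySem.Dict.getD_eq_get?_getD, hw]
        rfl
      · rw [PySem.Dict.getD_eq_get?_getD, PySem.Dict.get?_setdefault_of_ne d p.2 he,
          ← PySem.Dict.getD_eq_get?_getD]
    · have hcf : d.contains k = false := by simpa using hc
      rw [if_neg hc]
      by_cases he : k = p.1
      · have h1 : (d.setdefault p.1 p.2).contains k = true := by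
          rw [PySem.Dict.contains_setdefault]
          simp [he]
        rw [if_pos h1]
        have hn : d.get? k = none := (PySem.Dict.get?_eq_none_iff_contains d k).mpr hcf
        rw [he, PySem.Dict.getD_eq_get?_getD, PySem.Dict.get?_setdefault_self, ← he, hn]
        have hb : (p.1 == k) = true := by simp [he.symm]
        simp [hb]
      · have h1 : (d.setdefault p.1 p.2).contains k = false := by
          rw [PySem.Dict.contains_setdefault]
          simp [he, hcf]
        rw [if_neg (by simp [h1])]
        have hb : (p.1 == k) = false := by simp [Ne.symm he]
        simp [hb]

theorem sd_fold_keys (l : List (Int × Int)) (d : PySem.Dict Int Int) :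
    (l.foldl (fun d p => d.setdefault p.1 p.2) d).keys
      = PySem.Set.update d.keys (l.map (·.1)) := by
  induction l generalizing d with
  | nil => rfl
  | cons p t ih =>
    simp only [List.foldl_cons, List.map_cons]
    rw [ih]
    have hstep : (d.setdefault p.1 p.2).keys = PySem.Set.add d.keys p.1 := by
      rw [PySem.Dict.keys_setdefault]
      by_cases hc : d.contains p.1 = true
      · rw [if_pos hc, PySem.Set.add_of_mem ((PySem.Dict.contains_iff_mem_keys d p.1).mp hc)]
      · have hcf : p.1 ∉ d.keys := fun hm =>
          hc ((PySem.Dict.contains_iff_mem_keys d p.1).mpr hm)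
        rw [if_neg hc, PySem.Set.add_of_not_mem hcf]
    rw [hstep]
    rfl

theorem foldl_add_cons_of_not_mem {a : Int} (l : List Int) (h : a ∉ l) (t : List Int) :
    l.foldl PySem.Set.add (a :: t) = a :: l.foldl PySem.Set.add t := by
  induction l generalizing t with
  | nil => rfl
  | cons x l ih =>
    have hxa : x ≠ a := fun he => h (by simp [he])
    have hal : a ∉ l := fun hm => h (by simp [hm])
    simp only [List.foldl_cons]
    have hstep : PySem.Set.add (a :: t) x = a :: PySem.Set.add t x := by
      by_cases hx : x ∈ t
      · rw [PySem.Set.add_of_mem hx, PySem.Set.add_of_mem (by simp [hx])]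
      · rw [PySem.Set.add_of_not_mem hx,
          PySem.Set.add_of_not_mem (by simp [hx, fun he => hxa he])]
        rfl
    rw [hstep, ih hal]

theorem foldl_add_replicate_self (n : Nat) (s : Int) :
    (List.replicate n s).foldl PySem.Set.add [] = if n = 0 then [] else [s] := by
  cases n with
  | zero => rfl
  | succ m =>
    simp only [List.replicate_succ, List.foldl_cons, if_neg (Nat.succ_ne_zero m)]
    have hone : PySem.Set.add ([] : PySem.Set Int) s = [s] := rfl
    rw [hone]
    induction m with
    | zero => rfl
    | succ k ihk =>
      simp only [List.replicate_succ, List.foldl_cons]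
      rw [PySem.Set.add_of_mem (by simp : s ∈ [s])]
      exact ihk

theorem setlen_eq_countP (L : List (List Int)) (s k : Int) :
    PySem.Set.len (PySem.Set.ofList (((uicPairs s L).filter (fun p => p.1 == k)).map (·.2)))
      = (L.countP (fun c => decide (k ∈ c)) : Int) := by
  induction L generalizing s with
  | nil => rfl
  | cons c L ih =>
    rw [uicPairs_cons, List.filter_append, List.map_append]
    have h1 : ((c.map (fun x => (x, s))).filter (fun p => p.1 == k)).map (·.2)
        = List.replicate (c.count k) s := by
      rw [List.filter_map]
      have : ((fun p : Int × Int => p.1 == k) ∘ (fun x => (x, s))) = (fun x => x == k) := rfl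
      rw [this, List.map_map]
      have : ((·.2) ∘ (fun x : Int => (x, s))) = (fun _ => s) := rfl
      rw [this, List.map_const', List.count, List.countP_eq_length_filter]
    rw [h1]
    set r := ((uicPairs (s + 1) L).filter (fun p => p.1 == k)).map (·.2) with hr
    have hsr : s ∉ r := by
      intro hm
      obtain ⟨p, hp, hps⟩ := List.mem_map.mp hm
      have hp' := List.mem_of_mem_filter hp
      have := uicPairs_snd_ge (s + 1) L p hp'
      omega
    have ih' := ih (s + 1)
    rw [PySem.Set.ofList_eq_foldl] at ih'
    rw [PySem.Set.ofList_eq_foldl, List.foldl_append, foldl_add_replicate_self]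
    by_cases hm : c.count k = 0
    · have hk : k ∉ c := List.count_eq_zero.mp hm
      rw [if_pos hm]
      rw [ih', List.countP_cons]
      simp [hk]
    · have hk : k ∈ c := List.count_pos_iff.mp (Nat.pos_of_ne_zero hm)
      rw [if_neg hm, foldl_add_cons_of_not_mem r hsr]
      have hlen : ∀ (x : Int) (xs : List Int),
          PySem.Set.len (x :: xs) = PySem.Set.len xs + 1 := by
        intro x xs; simp [PySem.Set.len]
      rw [hlen, ih', List.countP_cons]
      simp [hk]

theorem cnt_fold_getD (L : List (List Int)) (d : PySem.Dict Int Int) (k : Int) :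
    (L.foldl (fun d c => (PySem.Set.ofList c).foldl
        (fun d x => d.insert x (d.getD x 0 + 1)) d) d).getD k 0
      = d.getD k 0 + (L.countP (fun c => decide (k ∈ c)) : Int) := by
  induction L generalizing d with
  | nil => simp
  | cons c L ih =>
    simp only [List.foldl_cons]
    rw [ih, PySem.Dict.getD_foldl_insert_add_one,
      List.Nodup.count (PySem.Set.nodup_ofList c), List.countP_cons]
    by_cases hk : k ∈ c
    · simp [hk, PySem.Set.mem_ofList]
      omega
    · simp [hk, PySem.Set.mem_ofList]

-- ===== VERDICT (by name: the statement is the Claim_ definition above) =====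
theorem unique_ids_clustering_spec : Claim_equal_unique_ids_clustering := by
  intro clustering method _ hpre
  unfold Spec_unique_ids_clustering unique_ids_clustering unique_ids_clustering_alt
  simp only [A_flat, B_flat]
  -- shared facts
  have hkeysA := PySem.Dict.keys_foldl_modify_key (uicPairs 0 clustering) (fun p : Int × Int => p.1) []
      (fun d p => (fun v => v ++ [p.2])) PySem.Dict.empty
  rw [PySem.Dict.keys_empty, PySem.Set.update_nil_left] at hkeysA
  have hnodupA := PySem.Dict.nodup_keys_foldl_modify_key (uicPairs 0 clustering) (fun p : Int × Int => p.1) []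
      (fun d p => (fun v => v ++ [p.2])) PySem.Dict.empty PySem.Dict.nodup_keys_empty
  have hitemsA := PySem.Dict.items_eq_map_keys _ hnodupA ([] : List Int)
  rw [hkeysA] at hitemsA
  have hkeysB := sd_fold_keys (uicPairs 0 clustering) PySem.Dict.empty
  rw [PySem.Dict.keys_empty, PySem.Set.update_nil_left] at hkeysB
  have hnodupB : ((uicPairs 0 clustering).foldl
      (fun d p => d.setdefault p.1 p.2) PySem.Dict.empty).keys.Nodup := by
    rw [hkeysB]; exact PySem.Set.nodup_ofList _
  have hitemsB := PySem.Dict.items_eq_map_keys _ hnodupB (0 : Int)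
  rw [hkeysB] at hitemsB
  have hgetDA : ∀ k : Int, ((uicPairs 0 clustering).foldl
      (fun d p => d.modify p.1 [] (fun v => v ++ [p.2])) PySem.Dict.empty).getD k []
      = ((uicPairs 0 clustering).filter (fun p => p.1 == k)).map (·.2) := by
    intro k
    rw [PySem.Dict.getD_foldl_modify_append, PySem.Dict.getD_empty]
    rfl
  have hgetDB : ∀ k : Int, ((uicPairs 0 clustering).foldl
      (fun d p => d.setdefault p.1 p.2) PySem.Dict.empty).getD k 0
      = (((uicPairs 0 clustering).filter (fun p => p.1 == k)).map (·.2)).headD 0 := by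
    intro k
    rw [sd_fold_getD, if_neg (by simp [PySem.Dict.contains_empty])]
  rcases hpre with h | h <;> subst h
  · rw [if_neg (show ¬¬(("first_occurrence":String) = "first_occurrence" ∨ ("first_occurrence":String) = "unique_only") by simp)]
    rw [if_pos rfl, if_pos rfl, hitemsA, hitemsB, List.map_map, List.map_map]
    apply List.map_congr_left
    intro k _
    simp only [Function.comp]
    rw [hgetDA, hgetDB]
  · rw [if_neg (show ¬¬(("unique_only":String) = "first_occurrence" ∨ ("unique_only":String) = "unique_only") by simp)]
    rw [if_neg (show ¬("unique_only":String) = "first_occurrence" by decide)]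
    rw [if_neg (show ¬("unique_only":String) = "first_occurrence" by decide)]
    rw [if_pos rfl, hitemsA, hitemsB,
      List.filter_map, List.filter_map, List.map_map, List.map_map]
    have hfeq : ∀ k ∈ PySem.Set.ofList ((uicPairs 0 clustering).map (·.1)),
        ((fun kv : Int × List Int => PySem.Set.len (PySem.Set.ofList kv.2) == 1) ∘
          (fun k => (k, ((uicPairs 0 clustering).foldl
            (fun d p => d.modify p.1 [] (fun v => v ++ [p.2])) PySem.Dict.empty).getD k []))) k
        = ((fun kv : Int × Int => (clustering.foldl
            (fun d c => (PySem.Set.ofList c).foldl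
              (fun d pmid => d.insert pmid (d.getD pmid 0 + 1)) d)
            (PySem.Dict.empty : PySem.Dict Int Int)).getD kv.1 0 == 1) ∘
          (fun k => (k, ((uicPairs 0 clustering).foldl
            (fun d p => d.setdefault p.1 p.2) PySem.Dict.empty).getD k 0))) k := by
      intro k _
      simp only [Function.comp]
      have hcnt := cnt_fold_getD clustering PySem.Dict.empty k
      rw [PySem.Dict.getD_empty, zero_add] at hcnt
      rw [hgetDA, setlen_eq_countP, hcnt]
    rw [List.filter_congr hfeq]
    apply List.map_congr_left
    intro k _
    simp only [Function.comp]
    rw [hgetDA, hgetDB]
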